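-- pv_equiv track=rewrite | github.com/sternmotor/jacob | archive/devel/python/sr-lib/config/config_drbd_style.py | break_text
-- ===== SOURCE A (Python) =====
-- LINE_BREAK_CHARS = ('{', '}', ';' )
--
-- def break_text( text ):
--     broken_line = ''
--     new_text = []
--     for line in text:
--         for char in line:
--             for break_char in LINE_BREAK_CHARS:
--                 if char == break_char:
--                     broken_line += char
--                     new_text.append( broken_line.strip() )
--                     broken_line = ''
--                     break;
--             else:
--                 broken_line += char
--     return new_text
-- ===== SOURCE B (Python) =====
-- def break_text(text):
--     full = ''.join(text)
--     new_text = []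
--     start = 0
--     for i, ch in enumerate(full):
--         if ch in '{};':
--             new_text.append(full[start:i + 1].strip())
--             start = i + 1
--     return new_text
-- ===== Notes on version B (the rewrite author's own statement) =====
-- stated objective: faster
-- what changed: B joins all lines into one string first and makes a single indexed pass that cuts out and strips a slice at every delimiter, instead of A's three nested loops growing a character accumulator string.
import Mathlib
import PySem

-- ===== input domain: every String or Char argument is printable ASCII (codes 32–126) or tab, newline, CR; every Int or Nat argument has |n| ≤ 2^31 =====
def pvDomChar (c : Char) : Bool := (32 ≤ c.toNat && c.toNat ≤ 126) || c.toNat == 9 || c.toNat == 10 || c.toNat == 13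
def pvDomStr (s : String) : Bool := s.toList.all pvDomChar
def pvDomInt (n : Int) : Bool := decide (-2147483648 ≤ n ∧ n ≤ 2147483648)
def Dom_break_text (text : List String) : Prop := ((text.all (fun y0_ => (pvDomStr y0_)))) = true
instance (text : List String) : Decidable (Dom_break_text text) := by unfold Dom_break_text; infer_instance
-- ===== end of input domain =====

-- B joins all lines into one string and makes a single indexed pass cutting a stripped slice
-- at every '{' '}' ';' delimiter; same result as A's nested accumulator loops (alternative).

-- ===== PORT A =====
def LINE_BREAK_CHARS : List Char := ['{', '}', ';']

def break_text (text : List String) : List String :=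
  (text.foldl (fun st line =>
      line.toList.foldl (fun (st : List Char × List String) char =>
        if LINE_BREAK_CHARS.contains char then
          ([], st.2 ++ [String.ofList (PySem.Chars.strip (st.1 ++ [char]))])
        else (st.1 ++ [char], st.2)) st)
    (([] : List Char), ([] : List String))).2

-- ===== PORT B =====
def bLoop (full : List Char) : List String :=
  ((PySem.List.enumerate full 0).foldl (fun (st : Int × List String) p =>
      if ['{', '}', ';'].contains p.2 then
        (p.1 + 1, st.2 ++ [String.ofList (PySem.Chars.strip
            (PySem.List.slice full (some st.1) (some (p.1 + 1))))])
      else st)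
    ((0 : Int), ([] : List String))).2

def break_text_alt (text : List String) : List String :=
  bLoop ((text.map String.toList).flatten)

-- ===== PRECONDITION & SPEC =====
def Spec_break_text (text : List String) (out : List String) : Prop := out = break_text_alt text
instance (text : List String) (out : List String) : Decidable (Spec_break_text text out) := by unfold Spec_break_text; infer_instance

-- ===== CLAIM (what is proved, stated in full; the proofs are below) =====
def Claim_equal_break_text : Prop := ∀ (text : List String), Dom_break_text text → Spec_break_text text (break_text text)

-- ===== LEMMAS AND PROOFS =====

-- A's nested loop over lines then chars is the flat loop over the concatenation
theorem foldl_lines {β : Type} (g : β → Char → β) :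
    ∀ (text : List String) (st : β),
      text.foldl (fun st line => line.toList.foldl g st) st
        = ((text.map String.toList).flatten).foldl g st := by
  intro text
  induction text with
  | nil => intro st; rfl
  | cons l t ih => intro st; simp [List.foldl_append, ih]

theorem main_invariant (full : List Char) :
    ∀ (cs pre : List Char) (out : List String) (start : Nat),
      full = pre ++ cs → start ≤ pre.length →
      (cs.foldl (fun (st : List Char × List String) char =>
          if LINE_BREAK_CHARS.contains char then
            ([], st.2 ++ [String.ofList (PySem.Chars.strip (st.1 ++ [char]))])
          else (st.1 ++ [char], st.2)) (pre.drop start, out)).2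
      = ((PySem.List.enumerate cs (pre.length : Int)).foldl
            (fun (st : Int × List String) p =>
              if ['{', '}', ';'].contains p.2 then
                (p.1 + 1, st.2 ++ [String.ofList (PySem.Chars.strip
                    (PySem.List.slice full (some st.1) (some (p.1 + 1))))])
              else st) ((start : Int), out)).2 := by
  intro cs
  induction cs with
  | nil => intro pre out start _ _; simp [PySem.List.enumerate]
  | cons c cs ih =>
    intro pre out start hfull hstart
    rw [PySem.List.enumerate_cons]
    by_cases hc : LINE_BREAK_CHARS.contains c
    · have hc' : (['{', '}', ';'] : List Char).contains c := hc
      simp only [List.foldl_cons, hc, hc', if_true]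
      have hslice : PySem.List.slice full (some (start : Int)) (some ((pre.length : Int) + 1))
          = pre.drop start ++ [c] := by
        have : ((pre.length : Int) + 1) = (((pre.length + 1 : Nat)) : Int) := by push_cast; ring
        rw [this, PySem.List.slice_natCast, hfull]
        rw [List.drop_append_of_le_length hstart]
        have hlen : (pre.drop start).length = pre.length - start := by simp
        have : pre.length + 1 - start = (pre.drop start).length + 1 := by omega
        rw [show pre.length + 1 - start = (pre.drop start).length + 1 by omega]
        simp [List.take_append]
      rw [hslice]
      have := ih (pre ++ [c]) (out ++ [String.ofList (PySem.Chars.strip (pre.drop start ++ [c]))])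
        (pre.length + 1) (by simp [hfull]) (by simp)
      have hdrop : (pre ++ [c]).drop (pre.length + 1) = [] := by
        simp
      rw [hdrop] at this
      simp only [List.length_append, List.length_cons, List.length_nil] at this
      push_cast at this ⊢
      exact this
    · have hc' : ¬ (['{', '}', ';'] : List Char).contains c := hc
      simp only [List.foldl_cons, hc, hc']
      have := ih (pre ++ [c]) out start (by simp [hfull]) (by simp; omega)
      rw [List.drop_append_of_le_length hstart] at this
      simp only [List.length_append, List.length_cons, List.length_nil] at this
      push_cast at this ⊢
      exact this

-- ===== VERDICT (by name: the statement is the Claim_ definition above) =====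
theorem break_text_spec : Claim_equal_break_text := by
  intro text _
  unfold Spec_break_text break_text break_text_alt bLoop
  rw [foldl_lines]
  have := main_invariant ((text.map String.toList).flatten)
    ((text.map String.toList).flatten) [] [] 0 (by simp) (by simp)
  simpa using this
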